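-- pv_equiv track=rewrite | github.com/longzhan248/Mars | gui/modules/obfuscation/multiprocess_transformer.py | should_use_multiprocess
-- ===== SOURCE A (Python) =====
-- from typing import Dict, List, Optional, Callable, Any, Tuple
--
-- def should_use_multiprocess(parsed_files: Dict[str, Any]) -> bool:
--     """
--     判断是否应该使用多进程
--
--     决策逻辑：
--     - 单文件 > 5000 行：使用多进程
--     - 总行数 > 50000 行：使用多进程
--     - 文件数 < 4：不使用（进程开销大）
--
--     Args:
--         parsed_files: 解析后的文件字典
--
--     Returns:
--         是否应该使用多进程
--     """
--     if len(parsed_files) < 4: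
--         return False
--
--     # 计算总行数（如果有行数信息）
--     total_lines = 0
--     max_file_lines = 0
--
--     for file_path, symbols in parsed_files.items():
--         # 假设symbols中有total_lines字段
--         lines = symbols.get('total_lines', 0)
--         total_lines += lines
--         max_file_lines = max(max_file_lines, lines)
--
--     # 决策
--     if max_file_lines > 5000:
--         return True
--
--     if total_lines > 50000:
--         return True
--
--     return False
-- ===== SOURCE B (Python) =====
-- def should_use_multiprocess(parsed_files):
--     if len(parsed_files) < 4:
--         return False
--     counts = sorted((s.get('total_lines', 0) for s in parsed_files.values()),
--                     reverse=True)
--     if counts[0] > 5000: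
--         return True
--     return sum(counts) > 50000
-- ===== Notes on version B (the rewrite author's own statement) =====
-- stated objective: alternative
-- what changed: Replaces A's single accumulating pass that tracks a running total and a running max with a sort-then-inspect strategy: sort the per-file line counts in descending order, read the maximum off the head of the sorted list, and only then compare the total.
import Mathlib
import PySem

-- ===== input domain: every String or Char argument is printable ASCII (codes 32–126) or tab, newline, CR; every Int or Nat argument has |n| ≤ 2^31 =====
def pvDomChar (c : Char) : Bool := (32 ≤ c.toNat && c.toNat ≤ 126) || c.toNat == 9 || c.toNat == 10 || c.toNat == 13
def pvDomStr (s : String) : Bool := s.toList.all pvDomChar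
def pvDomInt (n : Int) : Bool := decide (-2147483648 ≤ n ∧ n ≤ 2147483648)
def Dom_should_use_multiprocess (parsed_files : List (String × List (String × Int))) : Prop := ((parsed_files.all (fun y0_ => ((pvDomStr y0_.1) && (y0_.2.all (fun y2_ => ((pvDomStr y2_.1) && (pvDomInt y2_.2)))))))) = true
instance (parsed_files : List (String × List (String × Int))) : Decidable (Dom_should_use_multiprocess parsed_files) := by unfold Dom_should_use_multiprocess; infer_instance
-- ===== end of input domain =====

-- B replaces A's single accumulating pass (running total + running max) by a
-- sort-then-inspect strategy: sort counts descending, read the max off the head,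
-- then compare the total — an alternative decomposition, not claimed faster.

-- shared primitive: symbols.get('total_lines', 0) on the association list
def pvGetLines (symbols : List (String × Int)) : Int :=
  (PySem.Dict.mk symbols).getD "total_lines" 0

-- ===== PORT A =====
def should_use_multiprocess (parsed_files : List (String × List (String × Int))) : Bool :=
  if parsed_files.length < 4 then false
  else
    let r := parsed_files.foldl
      (fun (acc : Int × Int) kv => (acc.1 + pvGetLines kv.2, max acc.2 (pvGetLines kv.2)))
      (0, 0)
    if r.2 > 5000 then true
    else if r.1 > 50000 then true
    else false

-- ===== PORT B =====
-- counts[0] is total (the length guard guarantees counts is nonempty; the [] branch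
-- is unreachable and mirrors Python's IndexError never firing there)
def should_use_multiprocess_alt (parsed_files : List (String × List (String × Int))) : Bool :=
  if parsed_files.length < 4 then false
  else
    let counts := PySem.List.sorted (parsed_files.map (fun kv => pvGetLines kv.2)) (fun x => x) true
    match counts with
    | [] => false
    | c :: rest => if c > 5000 then true else decide ((c :: rest).sum > 50000)

-- ===== PRECONDITION & SPEC =====
def Spec_should_use_multiprocess (parsed_files : List (String × List (String × Int))) (out : Bool) : Prop := out = should_use_multiprocess_alt parsed_files
instance (parsed_files : List (String × List (String × Int))) (out : Bool) : Decidable (Spec_should_use_multiprocess parsed_files out) := by unfold Spec_should_use_multiprocess; infer_instance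

-- ===== CLAIM =====
def Claim_equal_should_use_multiprocess : Prop := ∀ (parsed_files : List (String × List (String × Int))), Dom_should_use_multiprocess parsed_files → Spec_should_use_multiprocess parsed_files (should_use_multiprocess parsed_files)

-- ===== LEMMAS AND PROOFS =====

-- A's loop computes (starting total + sum of counts, max-fold of counts over the start max)
lemma pv_loop_eq (xs : List (String × List (String × Int))) :
    ∀ t m : Int,
      xs.foldl (fun (acc : Int × Int) kv => (acc.1 + pvGetLines kv.2, max acc.2 (pvGetLines kv.2))) (t, m)
      = (t + (xs.map (fun kv => pvGetLines kv.2)).sum,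
         (xs.map (fun kv => pvGetLines kv.2)).foldl max m) := by
  induction xs with
  | nil => intro t m; simp
  | cons x xs ih =>
    intro t m
    simp only [List.foldl_cons, List.map_cons, List.sum_cons]
    rw [ih]
    ring_nf

-- the max-fold exceeds c iff the start does or some element does
lemma pv_foldl_max_gt (c : Int) (L : List Int) :
    ∀ m : Int, decide (L.foldl max m > c) = (decide (m > c) || L.any (fun x => decide (x > c))) := by
  induction L with
  | nil => intro m; simp
  | cons x xs ih =>
    intro m
    rw [List.foldl_cons, List.any_cons, ih (max m x)]
    have hx : decide (max m x > c) = (decide (m > c) || decide (x > c)) := by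
      by_cases h1 : m > c <;> by_cases h2 : x > c <;> simp [h1, h2, max_def] <;> omega
    rw [hx, Bool.or_assoc]

-- ===== VERDICT =====
theorem should_use_multiprocess_spec : Claim_equal_should_use_multiprocess := by
  intro pf _
  unfold Spec_should_use_multiprocess should_use_multiprocess should_use_multiprocess_alt
  by_cases hlen : pf.length < 4
  · simp [hlen]
  · simp only [hlen, if_false]
    set L := pf.map (fun kv => pvGetLines kv.2) with hL
    -- L is nonempty
    have hLne : L ≠ [] := by
      intro h
      have : pf.length = 0 := by simpa [hL] using congrArg List.length h
      omega
    obtain ⟨c, rest, hs⟩ : ∃ c rest, PySem.List.sorted L (fun x => x) true = c :: rest := by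
      rcases h : PySem.List.sorted L (fun x => x) true with _ | ⟨c, rest⟩
      · exact absurd ((PySem.List.sorted_eq_nil_iff L (fun x => x) true).mp h) hLne
      · exact ⟨c, rest, rfl⟩
    have hperm : (c :: rest).Perm L := hs ▸ PySem.List.sorted_perm L (fun x => x) true
    have hmemc : c ∈ L := hperm.mem_iff.mp (List.mem_cons_self)
    have hge : ∀ y ∈ L, y ≤ c := by
      intro y hy
      simpa using PySem.List.key_head_sorted_rev_ge (xs := L) (key := fun x => x) hs y hy
    have hsum : (c :: rest).sum = L.sum := hperm.sum_eq
    -- A's max test equals (c > 5000)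
    have hmax := pv_foldl_max_gt 5000 L 0
    simp only [show decide ((0:Int) > 5000) = false from rfl, Bool.false_or] at hmax
    have hany : (L.any fun x => decide (x > 5000)) = decide (c > 5000) := by
      by_cases hc : c > 5000
      · simp only [decide_eq_true hc, List.any_eq_true]
        exact ⟨c, hmemc, decide_eq_true hc⟩
      · simp only [decide_eq_false hc, List.any_eq_false]
        intro x hx
        have := hge x hx
        simp; omega
    have hiff : (L.foldl max 0 > 5000) ↔ (c > 5000) :=
      decide_eq_decide.mp (hmax.trans hany)
    rw [pv_loop_eq pf 0 0, ← hL]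
    simp only [zero_add, hs, hsum]
    by_cases hc : L.foldl max 0 > 5000
    · simp [hc, hiff.mp hc]
    · have hnc : ¬ c > 5000 := fun h => hc (hiff.mpr h)
      by_cases ht : L.sum > 50000 <;> simp [hc, hnc, ht]
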